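-- pv_equiv track=rewrite | github.com/Rylinni/MergedProject | examine_training_data.py | construct_board
-- ===== SOURCE A (Python) =====
-- def construct_board(board_rep):
--     new_board = [[]]
--     i = 0
--     x = 0
--     for digit in board_rep:
--         x += i * digit
--         i += 1
--         if i == 8:
--             i = 0
--             if len(new_board[len(new_board) - 1]) == 5:
--                 new_board.append([])
--             new_board[len(new_board)-1].append(x)
--             x = 0
--     return new_board
-- ===== SOURCE B (Python) =====
-- def construct_board(board_rep):
--     cells = [sum(i * d for i, d in enumerate(board_rep[k:k + 8]))
--              for k in range(0, len(board_rep) - 7, 8)]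
--     if not cells:
--         return [[]]
--     return [cells[j:j + 5] for j in range(0, len(cells), 5)]
-- ===== Notes on version B (the rewrite author's own statement) =====
-- stated objective: simpler
-- what changed: A's single pass with a modular digit counter and in-place mutation of the last row is replaced by a two-stage decomposition: a comprehension slices out the complete 8-digit chunks and maps each to its enumerate-weighted sum, then a second comprehension slices the cell list into rows of 5, keeping the single empty row when no complete chunk exists.
import Mathlib
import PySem

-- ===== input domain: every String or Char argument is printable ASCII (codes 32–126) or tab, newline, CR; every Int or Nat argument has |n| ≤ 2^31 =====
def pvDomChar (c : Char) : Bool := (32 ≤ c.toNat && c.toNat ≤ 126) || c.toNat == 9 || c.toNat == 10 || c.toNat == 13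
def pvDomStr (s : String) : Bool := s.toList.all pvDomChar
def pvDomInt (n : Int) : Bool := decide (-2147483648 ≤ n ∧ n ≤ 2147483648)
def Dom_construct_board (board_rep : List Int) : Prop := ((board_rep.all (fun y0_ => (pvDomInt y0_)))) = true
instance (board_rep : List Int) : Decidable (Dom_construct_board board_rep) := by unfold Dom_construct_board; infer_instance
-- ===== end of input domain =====

-- B replaces A's single pass with modular counters and in-place row mutation by a
-- simpler decomposition: slice out the complete 8-digit chunks, map each to its
-- enumerate-weighted sum, then slice the cell list into rows of 5 (objective: simpler).

-- ===== PORT A =====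
-- step of A's for-loop; state = (new_board, i, x)
def cbStepA (st : List (List Int) × Int × Int) (digit : Int) :
    List (List Int) × Int × Int :=
  let nb := st.1
  let x := st.2.2 + st.2.1 * digit       -- x += i * digit
  let i := st.2.1 + 1                    -- i += 1
  if i == 8 then
    -- new_board[len(new_board)-1]: nb is never empty here (starts as [[]]);
    -- getLastD [] transliterates the last-element access.
    let nb := if ((nb.getLastD []).length : Int) == 5 then nb ++ [[]] else nb
    -- new_board[len(new_board)-1].append(x)
    (nb.dropLast ++ [nb.getLastD [] ++ [x]], 0, 0)
  else (nb, i, x)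

def construct_board (board_rep : List Int) : List (List Int) :=
  (board_rep.foldl cbStepA ([[]], 0, 0)).1

-- ===== PORT B =====
-- sum(i * d for i, d in enumerate(c))
def cbCellVal (c : List Int) : Int :=
  (PySem.List.enumerate c).foldl (fun s p => s + p.1 * p.2) 0

def construct_board_alt (board_rep : List Int) : List (List Int) :=
  -- cells = [sum(...) for k in range(0, len(board_rep) - 7, 8)]
  let cells := (PySem.List.pyRange 0 ((board_rep.length : Int) - 7) 8).map
      (fun k => cbCellVal (PySem.List.slice board_rep (some k) (some (k + 8))))
  -- if not cells: return [[]]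
  if cells = [] then [[]]
  -- return [cells[j:j+5] for j in range(0, len(cells), 5)]
  else (PySem.List.pyRange 0 (cells.length : Int) 5).map
      (fun j => PySem.List.slice cells (some j) (some (j + 5)))

-- ===== PRECONDITION & SPEC =====
def Spec_construct_board (board_rep : List Int) (out : List (List Int)) : Prop := out = construct_board_alt board_rep
instance (board_rep : List Int) (out : List (List Int)) : Decidable (Spec_construct_board board_rep out) := by unfold Spec_construct_board; infer_instance

-- ===== CLAIM (what is proved, stated in full; the proofs are below) =====
def Claim_equal_construct_board : Prop := ∀ (board_rep : List Int), Dom_construct_board board_rep → Spec_construct_board board_rep (construct_board board_rep)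

-- ===== LEMMAS AND PROOFS =====

-- reference forms both ports are reduced to: full 8-chunks and rows of 5
def cbFullChunks (seq : List Int) : List (List Int) :=
  if seq.length < 8 then [] else seq.take 8 :: cbFullChunks (seq.drop 8)
termination_by seq.length
decreasing_by simp; omega

def cbRows (cells : List Int) : List (List Int) :=
  if cells.length ≤ 5 then [cells] else cells.take 5 :: cbRows (cells.drop 5)
termination_by cells.length
decreasing_by simp; omega

-- what A does on completing an 8-digit chunk, per cell value v
def cbPush (nb : List (List Int)) (v : Int) : List (List Int) :=
  let nb := if ((nb.getLastD []).length : Int) == 5 then nb ++ [[]] else nb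
  nb.dropLast ++ [nb.getLastD [] ++ [v]]

-- a leftover shorter than a chunk never fires the i == 8 branch
lemma cbStepA_leftover (l : List Int) (nb : List (List Int)) (i x : Int)
    (h0 : 0 ≤ i) (h : i + l.length < 8) :
    (l.foldl cbStepA (nb, i, x)).1 = nb := by
  induction l generalizing i x with
  | nil => rfl
  | cons d t ih =>
    have hne : (i + 1 == (8 : Int)) = false := by
      simp only [List.length_cons] at h
      have : (t.length : Int) ≥ 0 := by positivity
      simp only [beq_eq_false_iff_ne, ne_eq]
      push_cast at h; omega
    simp only [List.foldl_cons, cbStepA, hne, Bool.false_eq_true, if_false]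
    refine ih (i + 1) (x + i * d) (by omega) ?_
    simp only [List.length_cons] at h
    push_cast at h ⊢; omega

-- a full 8-digit chunk from a fresh counter performs one cbPush of its cell value
lemma cbStepA_chunk (a b c d e f g h : Int) (nb : List (List Int)) :
    ([a,b,c,d,e,f,g,h].foldl cbStepA (nb, 0, 0)) =
      (cbPush nb (cbCellVal [a,b,c,d,e,f,g,h]), 0, 0) := by
  simp [cbStepA, cbPush, cbCellVal, PySem.List.enumerate]

-- A's whole loop = fold of cbPush over the chunk cell values
lemma cbFold_chunks (l : List Int) (nb : List (List Int)) :
    (l.foldl cbStepA (nb, 0, 0)).1 =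
      ((cbFullChunks l).map cbCellVal).foldl cbPush nb := by
  by_cases hl : l.length < 8
  · have h0 : cbFullChunks l = [] := by rw [cbFullChunks, if_pos hl]
    rw [h0]
    simp only [List.map_nil, List.foldl_nil]
    exact cbStepA_leftover l nb 0 0 le_rfl (by omega)
  · rcases l with _ | ⟨a, _ | ⟨b, _ | ⟨c, _ | ⟨d, _ | ⟨e, _ | ⟨f, _ | ⟨g, _ | ⟨h, rest⟩⟩⟩⟩⟩⟩⟩⟩
    · simp at hl
    · simp at hl
    · simp at hl
    · simp at hl
    · simp at hl
    · simp at hl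
    · simp at hl
    · simp at hl
    have h0 : cbFullChunks (a :: b :: c :: d :: e :: f :: g :: h :: rest) =
        (a :: b :: c :: d :: e :: f :: g :: h :: rest).take 8 ::
          cbFullChunks ((a :: b :: c :: d :: e :: f :: g :: h :: rest).drop 8) := by
      rw [cbFullChunks, if_neg hl]
    rw [h0]
    simp only [List.take_succ_cons, List.take_zero, List.drop_succ_cons, List.drop_zero,
      List.map_cons, List.foldl_cons]
    have hc := cbStepA_chunk a b c d e f g h nb
    simp only [List.foldl_cons, List.foldl_nil] at hc
    rw [hc]
    exact cbFold_chunks rest _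
termination_by l.length
decreasing_by simp; omega

-- folding cbPush from a board ending in a short row builds cbRows
lemma cbFold_push (cells : List Int) (acc : List (List Int)) (r : List Int)
    (hr : r.length ≤ 5) :
    cells.foldl cbPush (acc ++ [r]) = acc ++ cbRows (r ++ cells) := by
  induction cells generalizing acc r with
  | nil =>
    simp only [List.foldl_nil, List.append_nil]
    rw [cbRows, if_pos hr]
  | cons v t ih =>
    by_cases h5 : r.length = 5
    · have hpush : cbPush (acc ++ [r]) v = (acc ++ [r]) ++ [[v]] := by
        simp [cbPush, h5]
      have hrv : cbRows (r ++ v :: t) = r :: cbRows (v :: t) := by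
        rw [cbRows, if_neg (by simp only [List.length_append, List.length_cons]; omega)]
        have ht : (r ++ v :: t).take 5 = r := by
          rw [← h5, List.take_left]
        have hd : (r ++ v :: t).drop 5 = v :: t := by
          rw [← h5, List.drop_left]
        rw [ht, hd]
      rw [List.foldl_cons, hpush, ih (acc ++ [r]) [v] (by simp), hrv]
      simp
    · have hc : ((r.length : Int) == 5) = false := by
        simp only [beq_eq_false_iff_ne, ne_eq]
        omega
      have hpush : cbPush (acc ++ [r]) v = acc ++ [r ++ [v]] := by
        simp [cbPush, hc]
      rw [List.foldl_cons, hpush, ih acc (r ++ [v]) (by simp; omega)]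
      have : r ++ [v] ++ t = r ++ v :: t := by simp
      rw [this]

-- pyRange with a positive step: nil, cons and translation laws
lemma pyRange_pos_nil (a b s : Int) (hs : 0 < s) (h : b ≤ a) :
    PySem.List.pyRange a b s = [] := by
  rw [PySem.List.pyRange_of_pos a b hs, if_neg (by omega)]
  simp

lemma pyRange_pos_cons (a b s : Int) (hs : 0 < s) (h : a < b) :
    PySem.List.pyRange a b s = a :: PySem.List.pyRange (a + s) b s := by
  rw [PySem.List.pyRange_of_pos a b hs, PySem.List.pyRange_of_pos (a + s) b hs, if_pos h]
  by_cases h2 : a + s < b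
  · rw [if_pos h2]
    have hdiv : (b - a + s - 1) / s = (b - (a + s) + s - 1) / s + 1 := by
      have he : b - a + s - 1 = (b - (a + s) + s - 1) + 1 * s := by ring
      rw [he, Int.add_mul_ediv_right _ _ (by omega)]
    have hge : 0 ≤ (b - (a + s) + s - 1) / s := Int.ediv_nonneg (by omega) (by omega)
    rw [hdiv, show ((b - (a + s) + s - 1) / s + 1).toNat
        = ((b - (a + s) + s - 1) / s).toNat + 1 by omega, List.range_succ_eq_map]
    simp only [List.map_cons, List.map_map, Nat.cast_zero, mul_zero, add_zero, List.cons.injEq,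
      true_and]
    refine List.map_congr_left fun k _ => ?_
    simp only [Function.comp_apply, Nat.succ_eq_add_one]
    push_cast; ring
  · rw [if_neg h2]
    have h1 : (b - a + s - 1) / s = 1 := by
      have hle : 1 ≤ (b - a + s - 1) / s := by
        rw [Int.le_ediv_iff_mul_le (by omega)]; omega
      have hlt : (b - a + s - 1) / s < 2 := by
        rw [Int.ediv_lt_iff_lt_mul (by omega)]; omega
      omega
    rw [h1]
    simp

lemma pyRange_pos_shift (a b s t : Int) (hs : 0 < s) :
    PySem.List.pyRange (a + t) (b + t) s = (PySem.List.pyRange a b s).map (· + t) := by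
  rw [PySem.List.pyRange_of_pos (a + t) (b + t) hs, PySem.List.pyRange_of_pos a b hs,
    List.map_map]
  have hc : (a + t < b + t) ↔ (a < b) := by omega
  have he : b + t - (a + t) + s - 1 = b - a + s - 1 := by ring
  rw [he, if_congr hc rfl rfl]
  refine List.map_congr_left fun k _ => ?_
  simp only [Function.comp_apply]
  ring

-- the chunk comprehension of B is cbFullChunks
lemma cbChunks_eq (l : List Int) :
    (PySem.List.pyRange 0 ((l.length : Int) - 7) 8).map
        (fun k => PySem.List.slice l (some k) (some (k + 8))) = cbFullChunks l := by
  by_cases hl : l.length < 8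
  · have h0 : cbFullChunks l = [] := by rw [cbFullChunks, if_pos hl]
    rw [h0, pyRange_pos_nil 0 _ 8 (by omega) (by omega)]
    simp
  · have h0 : cbFullChunks l = l.take 8 :: cbFullChunks (l.drop 8) := by
      rw [cbFullChunks, if_neg hl]
    have hcons := pyRange_pos_cons 0 ((l.length : Int) - 7) 8 (by omega) (by omega)
    rw [h0, hcons, List.map_cons]
    have hhead : PySem.List.slice l (some 0) (some (0 + 8)) = l.take 8 := by
      rw [show ((0 : Int) + 8) = ((8 : Nat) : Int) by norm_num,
        PySem.List.slice_zero_start, PySem.List.slice_to_natCast]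
    have hlen : (l.length : Int) - 7 = (((l.drop 8).length : Int) - 7) + 8 := by
      simp only [List.length_drop]
      omega
    rw [hhead, show ((0 : Int) + 8) = 0 + (8 : Int) by norm_num, hlen,
      pyRange_pos_shift 0 _ 8 8 (by omega), List.map_map]
    have hfun : ∀ k ∈ PySem.List.pyRange 0 (((l.drop 8).length : Int) - 7) 8,
        ((fun k => PySem.List.slice l (some k) (some (k + 8))) ∘ (· + (8 : Int))) k =
          PySem.List.slice (l.drop 8) (some k) (some (k + 8)) := by
      intro k hk
      have hk0 : 0 ≤ k := by
        have := (PySem.List.mem_pyRange_iff_of_pos (by omega : (0:Int) < 8) k).mp hk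
        omega
      simp only [Function.comp_apply]
      rw [PySem.List.slice_toNat l (by omega) (by omega),
        PySem.List.slice_toNat (l.drop 8) (by omega) (by omega)]
      have h1 : (k + 8).toNat = k.toNat + 8 := by omega
      have h2 : (k + 8 + 8).toNat = (k + 8).toNat + 8 := by omega
      rw [h2, h1]
      have h3 : l.drop (k.toNat + 8) = (l.drop 8).drop k.toNat := by
        rw [List.drop_drop]
        congr 1
        omega
      rw [h3]
      congr 1
      omega
    rw [List.map_congr_left hfun, cbChunks_eq (l.drop 8)]
termination_by l.length
decreasing_by simp only [List.length_drop]; omega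

-- the row comprehension of B is cbRows, for a nonempty cell list
lemma cbRows_eq (cells : List Int) (hne : cells ≠ []) :
    (PySem.List.pyRange 0 (cells.length : Int) 5).map
        (fun j => PySem.List.slice cells (some j) (some (j + 5))) = cbRows cells := by
  have hpos : 0 < cells.length := List.length_pos_iff.mpr hne
  have hcons := pyRange_pos_cons 0 (cells.length : Int) 5 (by omega) (by
    exact_mod_cast hpos)
  rw [hcons, List.map_cons]
  have hhead : PySem.List.slice cells (some 0) (some (0 + 5)) = cells.take 5 := by
    rw [show ((0 : Int) + 5) = ((5 : Nat) : Int) by norm_num,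
      PySem.List.slice_zero_start, PySem.List.slice_to_natCast]
  rw [hhead]
  by_cases h5 : cells.length ≤ 5
  · have h0 : cbRows cells = [cells] := by
      rw [cbRows, if_pos h5]
    rw [h0, pyRange_pos_nil _ _ 5 (by omega) (by omega)]
    simp only [List.map_nil]
    rw [List.take_of_length_le h5]
  · have h0 : cbRows cells = cells.take 5 :: cbRows (cells.drop 5) := by
      rw [cbRows, if_neg h5]
    have hlen : (cells.length : Int) = (((cells.drop 5).length : Int)) + 5 := by
      simp only [List.length_drop]
      omega
    rw [h0, show ((0 : Int) + 5) = 0 + (5 : Int) by norm_num, hlen,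
      pyRange_pos_shift 0 _ 5 5 (by omega), List.map_map]
    have hfun : ∀ j ∈ PySem.List.pyRange 0 ((cells.drop 5).length : Int) 5,
        ((fun j => PySem.List.slice cells (some j) (some (j + 5))) ∘ (· + (5 : Int))) j =
          PySem.List.slice (cells.drop 5) (some j) (some (j + 5)) := by
      intro j hj
      have hj0 : 0 ≤ j := by
        have := (PySem.List.mem_pyRange_iff_of_pos (by omega : (0:Int) < 5) j).mp hj
        omega
      simp only [Function.comp_apply]
      rw [PySem.List.slice_toNat cells (by omega) (by omega),
        PySem.List.slice_toNat (cells.drop 5) (by omega) (by omega)]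
      have h1 : (j + 5).toNat = j.toNat + 5 := by omega
      have h2 : (j + 5 + 5).toNat = (j + 5).toNat + 5 := by omega
      rw [h2, h1]
      have h3 : cells.drop (j.toNat + 5) = (cells.drop 5).drop j.toNat := by
        rw [List.drop_drop]
        congr 1
        omega
      rw [h3]
      congr 1
      omega
    rw [List.map_congr_left hfun]
    have hne' : cells.drop 5 ≠ [] := by
      intro hnil
      have := congrArg List.length hnil
      simp only [List.length_drop, List.length_nil] at this
      omega
    rw [cbRows_eq (cells.drop 5) hne']
termination_by cells.length
decreasing_by simp only [List.length_drop]; omega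

-- B computes cbRows of the chunk cell values
lemma cbAlt_eq (l : List Int) :
    construct_board_alt l = cbRows ((cbFullChunks l).map cbCellVal) := by
  unfold construct_board_alt
  have hcells : (PySem.List.pyRange 0 ((l.length : Int) - 7) 8).map
      (fun k => cbCellVal (PySem.List.slice l (some k) (some (k + 8)))) =
        (cbFullChunks l).map cbCellVal := by
    rw [← cbChunks_eq l, List.map_map]
    rfl
  rw [hcells]
  by_cases hnil : (cbFullChunks l).map cbCellVal = []
  · rw [if_pos hnil, hnil]
    rw [cbRows, if_pos (by simp)]
  · rw [if_neg hnil, cbRows_eq _ hnil]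

-- ===== VERDICT (by name: the statement is the Claim_ definition above) =====
theorem construct_board_spec : Claim_equal_construct_board := by
  intro l _
  unfold Spec_construct_board construct_board
  rw [cbFold_chunks, cbAlt_eq]
  have := cbFold_push ((cbFullChunks l).map cbCellVal) [] [] (by simp)
  simpa using this
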